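-- pv_equiv track=rewrite | github.com/ManuelNuniez/Collage_Programs | Python/modelo de final/ejercicio 1.py | ExtraerCaracter
-- ===== SOURCE A (Python) =====
-- def ExtraerCaracter(frase,lista=[], contador=0):
--     if contador>=len(frase):
--         return lista
--     else:
--         if frase[contador][0].isalpha():
--             return ExtraerCaracter(frase,lista+list(frase[contador][0]),contador+1)
--         else:
--             return ExtraerCaracter(frase,lista,contador+1)
-- ===== SOURCE B (Python) =====
-- def ExtraerCaracter(frase, lista=[], contador=0):
--     # Iterative re-implementation: copy the prefix, then one for-loop from contador.
--     result = list(lista)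
--     for i in range(contador, len(frase)):
--         c = frase[i][0]
--         if c.isalpha():
--             result.append(c)
--     return result
-- ===== Notes on version B (the rewrite author's own statement) =====
-- stated objective: faster
-- what changed: Replaces A's tail recursion, which rebuilds the accumulator with lista+list(...) at every step, with a single explicit for-loop over range(contador, len(frase)) appending to one copied list.
import Mathlib
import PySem

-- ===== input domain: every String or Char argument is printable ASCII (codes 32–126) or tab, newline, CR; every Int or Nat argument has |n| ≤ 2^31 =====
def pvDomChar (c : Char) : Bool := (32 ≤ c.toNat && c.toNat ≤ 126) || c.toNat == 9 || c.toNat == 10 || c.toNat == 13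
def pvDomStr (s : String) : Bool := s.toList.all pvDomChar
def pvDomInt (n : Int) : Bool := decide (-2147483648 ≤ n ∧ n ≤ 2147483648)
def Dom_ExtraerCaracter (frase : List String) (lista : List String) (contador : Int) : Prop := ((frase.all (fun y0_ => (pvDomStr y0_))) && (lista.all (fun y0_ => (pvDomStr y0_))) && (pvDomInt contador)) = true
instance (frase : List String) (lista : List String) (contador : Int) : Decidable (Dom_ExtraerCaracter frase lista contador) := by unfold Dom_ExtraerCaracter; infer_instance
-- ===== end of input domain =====

-- B replaces A's tail recursion with one iterative pass (a fold over range(contador, len(frase))); same return value.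


-- ===== PORT A =====
-- literal transliteration of A's tail recursion; the `none` branches are IndexError, excluded by Pre_
def ExtraerCaracter (frase : List String) (lista : List String) (contador : Int) : List String :=
  if _h : (frase.length : Int) ≤ contador then lista
  else
    match PySem.List.pyGet? frase contador with
    | none => lista   -- IndexError (outside Pre_)
    | some s =>
      match PySem.Str.pyGet? s 0 with
      | none => lista -- IndexError on empty element (outside Pre_)
      | some c =>
        if PySem.Chars.isalpha c then
          ExtraerCaracter frase (lista ++ [String.mk [c]]) (contador + 1)
        else
          ExtraerCaracter frase lista (contador + 1)
  termination_by ((frase.length : Int) - contador).toNat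
  decreasing_by all_goals omega

-- ===== PORT B =====
-- literal transliteration of B: copy `lista`, one for-loop over range(contador, len(frase))
def ExtraerCaracter_alt (frase : List String) (lista : List String) (contador : Int) : List String :=
  (PySem.List.pyRange contador (frase.length : Int) 1).foldl
    (fun result i =>
      match PySem.List.pyGet? frase i with
      | none => result   -- IndexError (outside Pre_)
      | some s =>
        match PySem.Str.pyGet? s 0 with
        | none => result -- IndexError on empty element (outside Pre_)
        | some c => if PySem.Chars.isalpha c then result ++ [String.mk [c]] else result)
    lista

-- ===== PRECONDITION & SPEC =====
-- Pre_ excludes exactly the inputs on which A raises IndexError: some visited index i in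
-- range(contador, len(frase)) is out of range (contador < -len(frase)) or frase[i] is the empty string.
def Pre_ExtraerCaracter (frase : List String) (lista : List String) (contador : Int) : Prop :=
  (frase.length : Int) ≤ contador ∨
    (-(frase.length : Int) ≤ contador ∧
      (if 0 ≤ contador then "" ∉ frase.drop contador.toNat else "" ∉ frase))
instance (frase : List String) (lista : List String) (contador : Int) : Decidable (Pre_ExtraerCaracter frase lista contador) := by unfold Pre_ExtraerCaracter; infer_instance

def pvWitness_ExtraerCaracter : List String × List String × Int := (["hola", "2x", "que", "!t", "tal"], ["z"], 0)

def Spec_ExtraerCaracter (frase : List String) (lista : List String) (contador : Int) (out : List String) : Prop := out = ExtraerCaracter_alt frase lista contador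
instance (frase : List String) (lista : List String) (contador : Int) (out : List String) : Decidable (Spec_ExtraerCaracter frase lista contador out) := by unfold Spec_ExtraerCaracter; infer_instance

-- ===== CLAIM (what is proved, stated in full; the proofs are below) =====
def Claim_equal_ExtraerCaracter : Prop := ∀ (frase : List String) (lista : List String) (contador : Int), Dom_ExtraerCaracter frase lista contador → Pre_ExtraerCaracter frase lista contador → Spec_ExtraerCaracter frase lista contador (ExtraerCaracter frase lista contador)

-- ===== LEMMAS AND PROOFS =====

-- Pre_ implies every visited index yields a nonempty element
theorem Pre_visited (frase lista : List String) (contador : Int)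
    (h : Pre_ExtraerCaracter frase lista contador) :
    ∀ i ∈ PySem.List.pyRange contador (frase.length : Int) 1,
      (PySem.List.pyGet? frase i).getD "" ≠ "" := by
  intro i hi
  obtain ⟨hci, hil⟩ := (PySem.List.mem_pyRange_one).1 hi
  cases h with
  | inl h => omega
  | inr h =>
    obtain ⟨hge, hcond⟩ := h
    have hin : PySem.Raise.InRange frase.length i := by
      constructor <;> omega
    cases hx : PySem.List.pyGet? frase i with
    | none => exact absurd ((PySem.List.pyGet?_eq_none_iff frase i).1 hx) (not_not_intro hin)
    | some x =>
      simp only [Option.getD_some]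
      by_cases hc0 : 0 ≤ contador
      · rw [if_pos hc0] at hcond
        have hi0 : 0 ≤ i := by omega
        rw [PySem.List.pyGet?_of_nonneg frase hi0] at hx
        have hkl : contador.toNat + (i.toNat - contador.toNat) < frase.length := by omega
        have hxe : x = (frase.drop contador.toNat)[i.toNat - contador.toNat]'(by
            simpa [List.length_drop] using (by omega : i.toNat - contador.toNat < frase.length - contador.toNat)) := by
          rw [List.getElem_drop]
          have : frase[i.toNat]? = some x := hx
          have h2 : frase[contador.toNat + (i.toNat - contador.toNat)]'hkl = frase[i.toNat]'(by omega) := by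
            congr 1; omega
          rw [h2]
          exact (Option.some_inj.1 (by rw [← this, List.getElem?_eq_getElem (by omega : i.toNat < frase.length)])).symm
        intro hxe'
        exact hcond (by rw [← hxe', hxe] at *; exact List.getElem_mem _)
      · rw [if_neg hc0] at hcond
        intro hxe'
        exact hcond (hxe' ▸ PySem.List.mem_of_pyGet?_eq_some frase hx)

theorem ExtraerCaracter_eq_alt (n : Nat) :
    ∀ (frase lista : List String) (contador : Int),
      ((frase.length : Int) - contador).toNat = n →
      (∀ i ∈ PySem.List.pyRange contador (frase.length : Int) 1,
        (PySem.List.pyGet? frase i).getD "" ≠ "") →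
      ExtraerCaracter frase lista contador = ExtraerCaracter_alt frase lista contador := by
  induction n with
  | zero =>
    intro frase lista contador hn _
    have hle : (frase.length : Int) ≤ contador := by omega
    rw [ExtraerCaracter, ExtraerCaracter_alt, PySem.List.pyRange_one_eq_nil hle]
    simp [hle]
  | succ n ih =>
    intro frase lista contador hn hpre
    have hlt : contador < (frase.length : Int) := by omega
    have hmem : contador ∈ PySem.List.pyRange contador (frase.length : Int) 1 :=
      (PySem.List.mem_pyRange_one).2 ⟨le_refl _, hlt⟩
    have hhead := hpre contador hmem
    have hpre' : ∀ i ∈ PySem.List.pyRange (contador + 1) (frase.length : Int) 1,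
        (PySem.List.pyGet? frase i).getD "" ≠ "" := by
      intro i hi
      exact hpre i ((PySem.List.mem_pyRange_one).2
        (by have := (PySem.List.mem_pyRange_one).1 hi; omega))
    rw [ExtraerCaracter, ExtraerCaracter_alt, PySem.List.pyRange_one_cons hlt]
    simp only [List.foldl_cons, dif_neg (not_le.2 hlt)]
    cases hg : PySem.List.pyGet? frase contador with
    | none => rw [hg] at hhead; simp at hhead
    | some s =>
      rw [hg] at hhead
      simp only [Option.getD_some] at hhead
      cases hc : PySem.Str.pyGet? s 0 with
      | none =>
        exfalso
        apply hhead
        have h0 : PySem.Str.pyGet? s ((0:Nat):Int) = none := hc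
        rw [PySem.Str.pyGet?_natCast] at h0
        cases hs : s.toList with
        | nil => exact (String.ext (by simp [hs]))
        | cons a t => rw [hs] at h0; simp at h0
      | some c =>
        simp only [hc]
        by_cases ha : PySem.Chars.isalpha c = true
        · rw [if_pos ha]
          exact (ih frase (lista ++ [String.mk [c]]) (contador + 1) (by omega)
            hpre').trans (by rw [ExtraerCaracter_alt, if_pos ha])
        · rw [if_neg ha]
          exact (ih frase lista (contador + 1) (by omega) hpre').trans
            (by rw [ExtraerCaracter_alt, if_neg ha])

-- ===== VERDICT (by name: the statement is the Claim_ definition above) =====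
theorem ExtraerCaracter_spec : Claim_equal_ExtraerCaracter := by
  intro frase lista contador _ hpre
  exact ExtraerCaracter_eq_alt ((frase.length : Int) - contador).toNat frase lista contador rfl
    (Pre_visited frase lista contador hpre)
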